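-- pv_equiv track=rewrite | github.com/alexpickering/Python | uniqueValues.py | uniqueValues
-- ===== SOURCE A (Python) =====
-- def uniqueValues(aDict):
--     '''
--     aDict: a dictionary
--     returns list of
--     keys that
--     map to unique values
--     ascending order
--     '''
--     returnList = []
--     if (len(aDict) == 0):
--         return []
--     valueList = list(aDict.values())
--     keyList = list(aDict.keys())
--     for key, value in aDict.items():
--         if valueList.count(value) == 1:
--             returnList.append(key)
--     returnList.sort()
--     return returnList
-- ===== SOURCE B (Python) =====
-- def uniqueValues(aDict):
--     '''
--     aDict: a dictionary
--     returns list of keys that map to unique values, ascending order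
--     '''
--     items = sorted(aDict.items(), key=lambda kv: kv[1])
--     result = []
--     i = 0
--     n = len(items)
--     while i < n:
--         j = i + 1
--         while j < n and items[j][1] == items[i][1]:
--             j += 1
--         if j == i + 1:
--             result.append(items[i][0])
--         i = j
--     result.sort()
--     return result
-- ===== Notes on version B (the rewrite author's own statement) =====
-- stated objective: faster
-- what changed: Instead of counting each value by scanning the whole value list (quadratic), B sorts the items by value so equal values become contiguous, then a single run-length scan emits the key of every run of length 1, and sorts the keys.
import Mathlib
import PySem

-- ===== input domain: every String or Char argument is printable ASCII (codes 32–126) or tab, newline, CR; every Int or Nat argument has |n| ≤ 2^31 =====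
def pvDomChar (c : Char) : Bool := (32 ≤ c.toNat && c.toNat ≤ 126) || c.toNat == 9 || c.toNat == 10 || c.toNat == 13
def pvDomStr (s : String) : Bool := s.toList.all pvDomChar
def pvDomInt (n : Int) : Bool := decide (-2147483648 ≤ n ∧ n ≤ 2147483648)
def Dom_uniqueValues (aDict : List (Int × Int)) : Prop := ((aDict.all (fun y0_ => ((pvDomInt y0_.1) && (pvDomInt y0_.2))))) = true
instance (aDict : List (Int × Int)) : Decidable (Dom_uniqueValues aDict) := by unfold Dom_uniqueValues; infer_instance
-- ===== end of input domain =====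

-- B replaces A's per-item .count() scan (quadratic) by sort-items-by-value then a single
-- run-length scan that emits the key of each length-1 run, then sorts the keys (objective: faster).


-- ===== PORT A =====
def uniqueValues (aDict : List (Int × Int)) : List Int :=
  if aDict.length = 0 then []
  else
    let valueList := aDict.map Prod.snd
    let _keyList := aDict.map Prod.fst   -- A builds keyList and never uses it
    let returnList := aDict.foldl
      (fun acc kv => if PySem.List.count valueList kv.2 = 1 then acc ++ [kv.1] else acc) []
    PySem.List.sorted returnList (fun x => x)

-- ===== PORT B =====
-- the outer while loop of Source B: the inner while advances past the run of equal values
-- (takeWhile/dropWhile is that inner scan); a run of length 1 emits its key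
def scanRuns : List (Int × Int) → List Int
  | [] => []
  | kv :: rest =>
      (if rest.takeWhile (fun p => p.2 == kv.2) = [] then [kv.1] else []) ++
        scanRuns (rest.dropWhile (fun p => p.2 == kv.2))
termination_by l => l.length
decreasing_by
  have := List.length_dropWhile_le (fun p : Int × Int => p.2 == kv.2) rest
  simp only [List.length_cons]; omega

def uniqueValues_alt (aDict : List (Int × Int)) : List Int :=
  let items := PySem.List.sorted aDict (fun kv => kv.2)
  PySem.List.sorted (scanRuns items) (fun x => x)

-- ===== PRECONDITION & SPEC =====
def Spec_uniqueValues (aDict : List (Int × Int)) (out : List Int) : Prop := out = uniqueValues_alt aDict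
instance (aDict : List (Int × Int)) (out : List Int) : Decidable (Spec_uniqueValues aDict out) := by unfold Spec_uniqueValues; infer_instance

-- ===== CLAIM (what is proved, stated in full; the proofs are below) =====
def Claim_equal_uniqueValues : Prop := ∀ (aDict : List (Int × Int)), Dom_uniqueValues aDict → Spec_uniqueValues aDict (uniqueValues aDict)

-- ===== LEMMAS AND PROOFS =====

-- after dropping the run of value v from a value-sorted list, every remaining value is > v
lemma dropWhile_gt (v : Int) :
    ∀ rest : List (Int × Int), rest.Pairwise (fun a b => a.2 ≤ b.2) →
      (∀ p ∈ rest, v ≤ p.2) →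
      ∀ u ∈ rest.dropWhile (fun p => p.2 == v), v < u.2 := by
  intro rest
  induction rest with
  | nil => intro _ _ u hu; simp [List.dropWhile] at hu
  | cons a l ih =>
    intro hpw hle u hu
    rcases List.pairwise_cons.mp hpw with ⟨ha, hl⟩
    by_cases hq : a.2 = v
    · rw [List.dropWhile_cons_of_pos (by simp [hq])] at hu
      exact ih hl (fun p hp => hle p (by simp [hp])) u hu
    · rw [List.dropWhile_cons_of_neg (by simp [hq])] at hu
      have hav : v < a.2 := lt_of_le_of_ne (hle a (by simp)) (Ne.symm hq)
      rcases List.mem_cons.mp hu with rfl | hu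
      · exact hav
      · exact lt_of_lt_of_le hav (ha u hu)

-- the run-length scan over a value-sorted list = the keys whose value occurs exactly once
lemma scanRuns_eq : ∀ (n : Nat) (ys : List (Int × Int)), ys.length ≤ n →
    ys.Pairwise (fun a b => a.2 ≤ b.2) →
    scanRuns ys = (ys.filter (fun kv => (ys.map Prod.snd).count kv.2 == 1)).map Prod.fst := by
  intro n
  induction n with
  | zero =>
    intro ys hlen _
    have : ys = [] := List.eq_nil_of_length_eq_zero (Nat.le_zero.mp hlen)
    subst this; rw [scanRuns]; rfl
  | succ n ih =>
    intro ys hlen hpw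
    cases ys with
    | nil => rw [scanRuns]; rfl
    | cons kv rest =>
      rcases List.pairwise_cons.mp hpw with ⟨hle, hrest⟩
      set q := fun p : Int × Int => p.2 == kv.2 with hqdef
      set same := rest.takeWhile q with hsame
      set tail := rest.dropWhile q with htail
      have hsplit : rest = same ++ tail := (List.takeWhile_append_dropWhile).symm
      have hsv : ∀ p ∈ same, p.2 = kv.2 := by
        intro p hp
        have := List.mem_takeWhile_imp hp
        simpa [hqdef] using this
      have htv : ∀ u ∈ tail, kv.2 < u.2 :=
        dropWhile_gt kv.2 rest hrest (fun p hp => hle p hp)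
      -- counts in the whole list
      have hcount_same : (same.map Prod.snd).count kv.2 = same.length := by
        have hall : ∀ b ∈ same.map Prod.snd, kv.2 = b := by
          intro b hb
          rcases List.mem_map.mp hb with ⟨p, hp, hpb⟩
          exact (hpb ▸ (hsv p hp)).symm
        simpa using List.count_eq_length.mpr hall
      have hcount_tail0 : (tail.map Prod.snd).count kv.2 = 0 := by
        rw [List.count_eq_zero]
        intro hmem
        rcases List.mem_map.mp hmem with ⟨u, hu, huv⟩
        exact absurd (huv ▸ htv u hu) (lt_irrefl _)
      have hcount_head : ((kv :: rest).map Prod.snd).count kv.2 = 1 + same.length := by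
        rw [hsplit]
        simp [hcount_same, hcount_tail0, Nat.add_comm]
      have hcount_tailelt : ∀ u ∈ tail,
          ((kv :: rest).map Prod.snd).count u.2 = (tail.map Prod.snd).count u.2 := by
        intro u hu
        have huv : kv.2 < u.2 := htv u hu
        rw [hsplit]
        have h1 : (same.map Prod.snd).count u.2 = 0 := by
          rw [List.count_eq_zero]
          intro hmem
          rcases List.mem_map.mp hmem with ⟨p, hp, hpv⟩
          exact absurd (hpv ▸ hsv p hp) (by omega)
        simp [List.count_cons, h1]
        omega
      -- the filter on the head and on the 'same' block
      set P := fun p : Int × Int => ((kv :: rest).map Prod.snd).count p.2 == 1 with hP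
      have hPkv : P kv = decide (same = []) := by
        simp only [hP, hcount_head]
        by_cases h : same = []
        · simp [h]
        · have hne : same.length ≠ 0 := by simpa [List.length_eq_zero_iff] using h
          simp only [h, decide_false]
          simp only [beq_eq_false_iff_ne]
          omega
      have hPsame : ∀ p ∈ same, P p = false := by
        intro p hp
        have hne : same ≠ [] := List.ne_nil_of_mem hp
        have hl : 1 ≤ same.length := List.length_pos_iff.mpr hne
        simp only [hP, hsv p hp, hcount_head]
        simp only [beq_eq_false_iff_ne]
        omega
      have hPtail : ∀ u ∈ tail, P u = (((tail.map Prod.snd).count u.2) == 1) := by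
        intro u hu; simp only [hP, hcount_tailelt u hu]
      -- put the filter together
      have hfilter : (kv :: rest).filter P
          = (if same = [] then [kv] else []) ++ tail.filter
              (fun u => (tail.map Prod.snd).count u.2 == 1) := by
        rw [hsplit, List.filter_cons, List.filter_append]
        have h1 : same.filter P = [] := List.filter_eq_nil_iff.mpr (fun p hp => by simp [hPsame p hp])
        have h2 : tail.filter P = tail.filter (fun u => (tail.map Prod.snd).count u.2 == 1) :=
          List.filter_congr (fun u hu => hPtail u hu)
        rw [h1, h2, hPkv]
        by_cases h : same = [] <;> simp [h]
      -- recursive call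
      have htail_len : tail.length ≤ n := by
        have h1 : tail.length ≤ rest.length := htail ▸ List.length_dropWhile_le q rest
        have h2 : rest.length + 1 ≤ n + 1 := by simpa using hlen
        omega
      have htail_pw : tail.Pairwise (fun a b => a.2 ≤ b.2) :=
        hrest.sublist (htail ▸ List.dropWhile_sublist _)
      have hIH := ih tail htail_len htail_pw
      rw [scanRuns, ← hqdef, ← hsame, ← htail]
      rw [hIH, hfilter, List.map_append]
      congr 1
      by_cases h : same = [] <;> simp [h]

-- A's loop as filter-then-project
lemma loopA_eq (xs : List (Int × Int)) :
    (xs.foldl (fun acc kv =>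
        if PySem.List.count (xs.map Prod.snd) kv.2 = 1 then acc ++ [kv.1] else acc) ([] : List Int))
      = (xs.filter (fun kv => (xs.map Prod.snd).count kv.2 == 1)).map Prod.fst := by
  rw [show (fun (acc : List Int) (kv : Int × Int) =>
        if PySem.List.count (xs.map Prod.snd) kv.2 = 1 then acc ++ [kv.1] else acc)
      = (fun (acc : List Int) (kv : Int × Int) =>
        if (fun kv : Int × Int => (xs.map Prod.snd).count kv.2 == 1) kv = true
        then acc ++ [kv.1] else acc) from by
    funext acc kv; simp [PySem.List.count_eq]]
  rw [PySem.List.foldl_append_if]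
  simp

-- the two pre-sort lists are permutations of each other
lemma presort_perm (xs : List (Int × Int)) :
    ((PySem.List.sorted xs (fun kv => kv.2)).filter
        (fun kv => ((PySem.List.sorted xs (fun kv => kv.2)).map Prod.snd).count kv.2 == 1)).map Prod.fst
      |>.Perm ((xs.filter (fun kv => (xs.map Prod.snd).count kv.2 == 1)).map Prod.fst) := by
  set ys := PySem.List.sorted xs (fun kv => kv.2) with hy
  have hperm : ys.Perm xs := PySem.List.sorted_perm xs (fun kv => kv.2) false
  have hcount : ∀ v : Int, (ys.map Prod.snd).count v = (xs.map Prod.snd).count v :=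
    fun v => (hperm.map Prod.snd).count_eq v
  have hpred : ys.filter (fun kv => (ys.map Prod.snd).count kv.2 == 1)
      = ys.filter (fun kv => (xs.map Prod.snd).count kv.2 == 1) :=
    List.filter_congr (fun kv _ => by rw [hcount])
  rw [hpred]
  exact (hperm.filter _).map Prod.fst

-- ===== VERDICT (by name: the statement is the Claim_ definition above) =====
theorem uniqueValues_spec : Claim_equal_uniqueValues := by
  intro aDict _
  unfold Spec_uniqueValues
  by_cases h : aDict.length = 0
  · rw [List.length_eq_zero_iff] at h
    subst h
    show ([] : List Int) = PySem.List.sorted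
      (scanRuns (PySem.List.sorted ([] : List (Int × Int)) (fun kv => kv.2))) (fun x => x)
    rw [show PySem.List.sorted ([] : List (Int × Int)) (fun kv => kv.2) = [] from rfl, scanRuns]
    rfl
  · unfold uniqueValues uniqueValues_alt
    rw [if_neg h]
    show PySem.List.sorted (aDict.foldl (fun acc kv =>
        if PySem.List.count (aDict.map Prod.snd) kv.2 = 1 then acc ++ [kv.1] else acc) [])
        (fun x => x)
      = PySem.List.sorted (scanRuns (PySem.List.sorted aDict (fun kv => kv.2))) (fun x => x)
    rw [loopA_eq]
    set ys := PySem.List.sorted aDict (fun kv => kv.2) with hy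
    have hpw : ys.Pairwise (fun a b => a.2 ≤ b.2) :=
      PySem.List.sorted_pairwise aDict (fun kv => kv.2)
    rw [scanRuns_eq ys.length ys le_rfl hpw]
    exact ((PySem.List.sorted_id_eq_sorted_id_iff_perm _ _).mpr (presort_perm aDict)).symm
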